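-- pv_equiv track=rewrite | github.com/pypi-data/pypi-mirror-314 | packages/contrast-vuln-remediations/contrast_vuln_remediations-0.1.0-py3-none-any.whl/contrast_vuln_remediations/config.py | is_valid_uuid
-- ===== SOURCE A (Python) =====
-- def is_valid_uuid(uuid_str: str) -> bool:
--     """Simple UUID format validation"""
--     try:
--         uuid_parts = uuid_str.split("-")
--         if len(uuid_parts) != 5:
--             return False
--         if not all(len(part) == exp for part, exp in zip(uuid_parts, [8, 4, 4, 4, 12])):
--             return False
--         # Check if string contains only hexadecimal characters and hyphens
--         hex_chars = set("0123456789abcdefABCDEF-")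
--         return all(c in hex_chars for c in uuid_str)
--     except Exception:
--         return False
-- ===== SOURCE B (Python) =====
-- _HEX = frozenset("0123456789abcdefABCDEF")
--
--
-- def is_valid_uuid(uuid_str: str) -> bool:
--     """Single forward pass: consume four hex-group-plus-hyphen chunks, then a final 12-hex tail."""
--     s = uuid_str
--     for n in (8, 4, 4, 4):
--         if len(s) <= n or s[n] != "-" or not all(c in _HEX for c in s[:n]):
--             return False
--         s = s[n + 1:]
--     return len(s) == 12 and all(c in _HEX for c in s)
-- ===== Notes on version B (the rewrite author's own statement) =====
-- stated objective: alternative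
-- what changed: Replaces A's three separate passes (split on hyphen, zip part lengths against [8,4,4,4,12], then a whole-string hex-or-hyphen membership scan) by a single forward pass that consumes four hex-group-plus-hyphen chunks and a final 12-hex tail.
import Mathlib
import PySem

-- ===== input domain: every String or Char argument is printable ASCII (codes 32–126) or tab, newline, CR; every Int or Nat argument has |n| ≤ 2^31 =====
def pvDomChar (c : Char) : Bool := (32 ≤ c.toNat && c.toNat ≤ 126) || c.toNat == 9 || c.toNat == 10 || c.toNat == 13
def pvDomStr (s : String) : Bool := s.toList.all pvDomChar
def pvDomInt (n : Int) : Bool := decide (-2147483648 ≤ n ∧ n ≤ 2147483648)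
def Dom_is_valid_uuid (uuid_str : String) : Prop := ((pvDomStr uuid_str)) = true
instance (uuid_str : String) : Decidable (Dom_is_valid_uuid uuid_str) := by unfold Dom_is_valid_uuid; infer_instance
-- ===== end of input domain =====

-- B replaces A's split/zip/membership passes by a single forward pass that consumes
-- four hex-group-plus-hyphen chunks and a 12-hex tail (objective: alternative, same cost).


-- ===== PORT A =====
-- set("0123456789abcdefABCDEF-")
def pvHexDash : List Char := PySem.Set.ofList "0123456789abcdefABCDEF-".toList

def is_valid_uuid (uuid_str : String) : Bool :=
  -- uuid_parts = uuid_str.split("-")  (sep nonempty, so split? is always `some`)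
  match PySem.Str.split? uuid_str "-" with
  | none => false
  | some uuid_parts =>
    if uuid_parts.length ≠ 5 then false
    else if ¬ ((uuid_parts.zip [8, 4, 4, 4, 12]).all fun pe => PySem.Str.len pe.1 == pe.2) then
      false
    else uuid_str.toList.all fun c => pvHexDash.contains c

-- ===== PORT B =====
-- frozenset("0123456789abcdefABCDEF")
def pvHex : List Char := PySem.Set.ofList "0123456789abcdefABCDEF".toList

-- the `for n in (8, 4, 4, 4)` loop; the base case is B's final `return` line
def pvAltGo : List Nat → List Char → Bool
  | [], s => s.length == 12 && s.all fun c => pvHex.contains c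
  | n :: ns, s =>
    if s.length ≤ n then false
    else if PySem.List.pyGet? s (n : Int) ≠ some '-' then false
    else if ¬ ((PySem.List.slice s none (some (n : Int))).all fun c => pvHex.contains c) then false
    else pvAltGo ns (PySem.List.slice s (some ((n : Int) + 1)) none)

def is_valid_uuid_alt (uuid_str : String) : Bool :=
  pvAltGo [8, 4, 4, 4] uuid_str.toList

-- ===== PRECONDITION & SPEC =====
def Spec_is_valid_uuid (uuid_str : String) (out : Bool) : Prop := out = is_valid_uuid_alt uuid_str
instance (uuid_str : String) (out : Bool) : Decidable (Spec_is_valid_uuid uuid_str out) := by unfold Spec_is_valid_uuid; infer_instance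

-- ===== CLAIM (what is proved, stated in full; the proofs are below) =====
def Claim_equal_is_valid_uuid : Prop := ∀ (uuid_str : String), Dom_is_valid_uuid uuid_str → Spec_is_valid_uuid uuid_str (is_valid_uuid uuid_str)

-- ===== LEMMAS AND PROOFS =====

-- simple reference splitter on '-' (proved equal to PySem.Chars.splitOn · ['-'])
def pvConsHead (x : List Char) : List (List Char) → List (List Char)
  | [] => [x]
  | p :: ps => (x ++ p) :: ps

def pvSplitDash : List Char → List (List Char)
  | [] => [[]]
  | c :: rest => if c = '-' then [] :: pvSplitDash rest else pvConsHead [c] (pvSplitDash rest)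

theorem pvSplitDash_ne_nil (s : List Char) : pvSplitDash s ≠ [] := by
  induction s with
  | nil => simp [pvSplitDash]
  | cons c rest ih =>
    simp only [pvSplitDash]
    split
    · simp
    · cases h : pvSplitDash rest with
      | nil => exact absurd h ih
      | cons p ps => simp [pvConsHead]

theorem pvConsHead_nil (l : List (List Char)) (h : l ≠ []) : pvConsHead [] l = l := by
  cases l with
  | nil => exact absurd rfl h
  | cons p ps => simp [pvConsHead]

theorem pvConsHead_consHead (x y : List Char) (l : List (List Char)) :
    pvConsHead x (pvConsHead y l) = pvConsHead (x ++ y) l := by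
  cases l <;> simp [pvConsHead]

theorem pvSplitOn_go_eq (fuel : Nat) (l cur : List Char) (acc : List (List Char))
    (hf : l.length < fuel) :
    PySem.Chars.splitOn.go ['-'] fuel l cur acc
      = acc.reverse ++ pvConsHead cur.reverse (pvSplitDash l) := by
  induction fuel generalizing l cur acc with
  | zero => omega
  | succ fuel ih =>
    cases l with
    | nil =>
      simp [PySem.Chars.splitOn.go, pvSplitDash, pvConsHead]
    | cons c rest =>
      rw [PySem.Chars.splitOn.go]
      by_cases hc : c = '-'
      · subst hc
        have hpre : List.isPrefixOf ['-'] ('-' :: rest) = true := by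
          simp [List.isPrefixOf]
        simp only [hpre, if_true]
        rw [ih _ _ _ (by simpa using Nat.lt_of_succ_lt_succ hf)]
        have hne := pvSplitDash_ne_nil rest
        simp only [List.length_cons, List.length_nil, List.drop_succ_cons, List.drop_zero,
          List.reverse_nil, pvConsHead_nil _ hne]
        simp [pvSplitDash, pvConsHead]
      · have hpre : List.isPrefixOf ['-'] (c :: rest) = false := by
          simp only [List.isPrefixOf, Bool.and_true]
          exact beq_eq_false_iff_ne.2 fun hct => hc hct.symm
        simp only [hpre, Bool.false_eq_true, if_false]
        rw [ih _ _ _ (by simpa using Nat.lt_of_succ_lt_succ hf)]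
        simp [pvSplitDash, hc, pvConsHead_consHead]

theorem pvSplitOn_eq (s : List Char) :
    PySem.Chars.splitOn s ['-'] = pvSplitDash s := by
  unfold PySem.Chars.splitOn
  rw [pvSplitOn_go_eq _ _ _ _ (by omega)]
  simp [pvConsHead_nil _ (pvSplitDash_ne_nil s)]

-- no part produced by the splitter contains '-'
theorem pvSplitDash_noDash (s : List Char) :
    ∀ p ∈ pvSplitDash s, '-' ∉ p := by
  induction s with
  | nil => simp [pvSplitDash]
  | cons c rest ih =>
    intro p hp
    simp only [pvSplitDash] at hp
    by_cases hc : c = '-'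
    · rw [if_pos hc] at hp
      rcases List.mem_cons.1 hp with h | h
      · simp [h]
      · exact ih p h
    · rw [if_neg hc] at hp
      cases hsp : pvSplitDash rest with
      | nil => exact absurd hsp (pvSplitDash_ne_nil rest)
      | cons q qs =>
        rw [hsp] at hp
        simp only [pvConsHead, List.mem_cons] at hp
        rcases hp with h | h
        · subst h
          intro hmem
          rcases List.mem_append.1 hmem with h1 | h1
          · simp at h1; exact hc h1.symm
          · exact ih q (hsp ▸ List.mem_cons_self) h1
        · exact ih p (hsp ▸ List.mem_cons_of_mem _ h)

-- splitter laws used to compute pvSplitDash on a decomposed string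
theorem pvSplitDash_append (a s : List Char) (ha : '-' ∉ a) :
    pvSplitDash (a ++ s) = pvConsHead a (pvSplitDash s) := by
  induction a with
  | nil => simp [pvConsHead_nil _ (pvSplitDash_ne_nil s)]
  | cons c a ih =>
    have hc : c ≠ '-' := fun h => ha (h ▸ List.mem_cons_self)
    have ha' : '-' ∉ a := fun h => ha (List.mem_cons_of_mem _ h)
    simp only [List.cons_append, pvSplitDash, if_neg hc, ih ha', pvConsHead_consHead]
    simp

theorem pvSplitDash_dash (s : List Char) :
    pvSplitDash ('-' :: s) = [] :: pvSplitDash s := by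
  simp [pvSplitDash]

theorem pvSplitDash_noDash_id (a : List Char) (ha : '-' ∉ a) :
    pvSplitDash a = [a] := by
  have := pvSplitDash_append a [] ha
  simpa [pvSplitDash, pvConsHead] using this

-- the shape both programs test for
def pvHexB (c : Char) : Bool := pvHex.contains c

def pvShape (cs : List Char) : Prop :=
  ∃ p1 p2 p3 p4 p5 : List Char,
    cs = p1 ++ '-' :: (p2 ++ '-' :: (p3 ++ '-' :: (p4 ++ '-' :: p5)))
    ∧ p1.length = 8 ∧ p2.length = 4 ∧ p3.length = 4 ∧ p4.length = 4 ∧ p5.length = 12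
    ∧ (p1 ++ p2 ++ p3 ++ p4 ++ p5).all pvHexB = true

theorem pvHex_eq_lit : pvHex = ['0','1','2','3','4','5','6','7','8','9','a','b','c','d','e','f','A','B','C','D','E','F'] := by
  decide

theorem pvHexDash_eq_lit : pvHexDash = ['0','1','2','3','4','5','6','7','8','9','a','b','c','d','e','f','A','B','C','D','E','F','-'] := by
  decide

theorem pvHexB_ne_dash (c : Char) (h : pvHexB c = true) : c ≠ '-' := by
  have hm : c ∈ pvHex := by simpa [pvHexB] using h
  rw [pvHex_eq_lit] at hm
  fin_cases hm <;> decide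

theorem pvHexDash_of_hexB (c : Char) (h : pvHexB c = true) : pvHexDash.contains c = true := by
  have hm : c ∈ pvHex := by simpa [pvHexB] using h
  rw [pvHex_eq_lit] at hm
  fin_cases hm <;> decide

theorem pvHexB_of_hexDash (c : Char) (h : pvHexDash.contains c = true) (hne : c ≠ '-') :
    pvHexB c = true := by
  have hm : c ∈ pvHexDash := by simpa using h
  rw [pvHexDash_eq_lit] at hm
  fin_cases hm <;> first | decide | exact absurd rfl hne

-- one step of B's loop
theorem pvAltGo_cons_iff (n : Nat) (ns : List Nat) (s : List Char) :
    pvAltGo (n :: ns) s = true ↔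
      ∃ p r, s = p ++ '-' :: r ∧ p.length = n ∧ p.all pvHexB = true ∧ pvAltGo ns r = true := by
  constructor
  · intro h
    simp only [pvAltGo] at h
    split_ifs at h with h1 h2 h3
    have hn : n < s.length := by omega
    rw [PySem.List.slice_from _ (by positivity)] at h
    rw [show ((n : Int) + 1).toNat = n + 1 by omega] at h
    rw [PySem.List.slice_to _ (by positivity), Int.toNat_natCast] at h3
    refine ⟨s.take n, s.drop (n + 1), ?_, by simp [Nat.min_eq_left (Nat.le_of_lt hn)], by simpa [pvHexB] using h3, h⟩
    rw [PySem.List.pyGet?_natCast] at h2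
    have hget : s[n]? = some '-' := of_not_not h2
    have hgetE : s[n] = '-' := by
      rw [List.getElem?_eq_getElem hn] at hget
      exact Option.some.inj hget
    conv_lhs => rw [← List.take_append_drop n s, List.drop_eq_getElem_cons hn, hgetE]
  · rintro ⟨p, r, rfl, hlen, hhex, hrec⟩
    have hlen' : (p ++ '-' :: r).length = n + 1 + r.length := by
      simp only [List.length_append, List.length_cons, hlen]; omega
    simp only [pvAltGo]
    rw [if_neg (by rw [hlen']; omega)]
    rw [if_neg ?hget]
    case hget =>
      simp only [PySem.List.pyGet?_natCast, not_not]
      rw [List.getElem?_append_right hlen.le]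
      simp [hlen]
    rw [if_neg ?hhex]
    case hhex =>
      rw [PySem.List.slice_to _ (by positivity), Int.toNat_natCast, not_not]
      have ht : List.take n (p ++ '-' :: r) = p := by
        rw [List.take_append_of_le_length (le_of_eq hlen.symm)]
        simp [hlen]
      rw [ht]
      simpa [pvHexB] using hhex
    rw [PySem.List.slice_from _ (by positivity)]
    rw [show ((n : Int) + 1).toNat = n + 1 by omega]
    have hd : List.drop (n + 1) (p ++ '-' :: r) = r := by
      rw [show n + 1 = p.length + 1 by omega, List.drop_append]
      simp
    rwa [hd]

theorem pvAlt_iff (s : String) : is_valid_uuid_alt s = true ↔ pvShape s.toList := by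
  unfold is_valid_uuid_alt pvShape
  rw [pvAltGo_cons_iff]
  constructor
  · rintro ⟨p1, r1, heq, h1, hx1, hb⟩
    rw [pvAltGo_cons_iff] at hb
    obtain ⟨p2, r2, rfl, h2, hx2, hb⟩ := hb
    rw [pvAltGo_cons_iff] at hb
    obtain ⟨p3, r3, rfl, h3, hx3, hb⟩ := hb
    rw [pvAltGo_cons_iff] at hb
    obtain ⟨p4, p5, rfl, h4, hx4, hb⟩ := hb
    simp only [pvAltGo, Bool.and_eq_true, beq_iff_eq] at hb
    exact ⟨p1, p2, p3, p4, p5, heq, h1, h2, h3, h4, hb.1,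
      by simp only [List.all_append, Bool.and_eq_true]
         exact ⟨⟨⟨⟨hx1, hx2⟩, hx3⟩, hx4⟩, hb.2⟩⟩
  · rintro ⟨p1, p2, p3, p4, p5, heq, h1, h2, h3, h4, h5, hall⟩
    simp only [List.all_append, Bool.and_eq_true] at hall
    obtain ⟨⟨⟨⟨hx1, hx2⟩, hx3⟩, hx4⟩, hx5⟩ := hall
    refine ⟨p1, _, heq, h1, hx1, ?_⟩
    rw [pvAltGo_cons_iff]
    refine ⟨p2, _, rfl, h2, hx2, ?_⟩
    rw [pvAltGo_cons_iff]
    refine ⟨p3, _, rfl, h3, hx3, ?_⟩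
    rw [pvAltGo_cons_iff]
    refine ⟨p4, _, rfl, h4, hx4, ?_⟩
    simp only [pvAltGo, Bool.and_eq_true, beq_iff_eq]
    exact ⟨h5, hx5⟩

def pvJoinD : List (List Char) → List Char
  | [] => []
  | p :: ps => p ++ (ps.flatMap fun q => '-' :: q)

theorem pvJoinD_splitDash (cs : List Char) : pvJoinD (pvSplitDash cs) = cs := by
  induction cs with
  | nil => rfl
  | cons c rest ih =>
    by_cases hc : c = '-'
    · subst hc
      rw [pvSplitDash_dash]
      cases h : pvSplitDash rest with
      | nil => exact absurd h (pvSplitDash_ne_nil rest)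
      | cons q qs =>
        rw [h] at ih
        simp only [pvJoinD, List.flatMap_cons, List.nil_append] at ih ⊢
        simp [ih]
    · rw [show pvSplitDash (c :: rest) = pvConsHead [c] (pvSplitDash rest) by
        simp [pvSplitDash, hc]]
      cases h : pvSplitDash rest with
      | nil => exact absurd h (pvSplitDash_ne_nil rest)
      | cons q qs =>
        rw [h] at ih
        simp only [pvConsHead, pvJoinD, List.cons_append] at ih ⊢
        simpa using ih

theorem pvSplitDash_shape (p r : List Char) (hp : '-' ∉ p) :
    pvSplitDash (p ++ '-' :: r) = p :: pvSplitDash r := by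
  rw [pvSplitDash_append _ _ hp, pvSplitDash_dash]
  simp [pvConsHead]

theorem pvNoDash_of_allHex (p : List Char) (h : p.all pvHexB = true) : '-' ∉ p :=
  fun hm => pvHexB_ne_dash '-' (List.all_eq_true.1 h '-' hm) rfl

theorem pvA_iff (s : String) : is_valid_uuid s = true ↔ pvShape s.toList := by
  -- the split is always `some`, and its parts are pvSplitDash of the char list
  have hbridge := PySem.Str.split?_map s "-"
  rw [show ("-" : String).toList = ['-'] from rfl] at hbridge
  rw [show PySem.Chars.split? s.toList ['-'] = some (pvSplitDash s.toList) by
    simp [PySem.Chars.split?, pvSplitOn_eq]] at hbridge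
  cases hsp : PySem.Str.split? s "-" with
  | none => rw [hsp] at hbridge; simp at hbridge
  | some parts =>
    rw [hsp] at hbridge
    simp only [Option.map_some, Option.some.injEq] at hbridge
    have hA : is_valid_uuid s = (if parts.length ≠ 5 then false
        else if ¬ ((parts.zip [8, 4, 4, 4, 12]).all fun pe => PySem.Str.len pe.1 == pe.2) then false
        else s.toList.all fun c => pvHexDash.contains c) := by
      unfold is_valid_uuid
      rw [hsp]
    rw [hA]
    constructor
    · intro h
      split_ifs at h with h1 h2
      have h5 : parts.length = 5 := of_not_not h1
      have hzip := h2
      clear h1 h2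
      obtain ⟨a1, a2, a3, a4, a5, rfl⟩ :
          ∃ a1 a2 a3 a4 a5, parts = [a1, a2, a3, a4, a5] := by
        rcases parts with _ | ⟨a1, _ | ⟨a2, _ | ⟨a3, _ | ⟨a4, _ | ⟨a5, rest⟩⟩⟩⟩⟩ <;>
          simp only [List.length_nil, List.length_cons] at h5 <;> try omega
        have : rest = [] := List.eq_nil_of_length_eq_zero (by omega)
        exact ⟨a1, a2, a3, a4, a5, by rw [this]⟩
      simp only [List.map_cons, List.map_nil] at hbridge
      simp only [List.zip_cons_cons, List.zip_nil_right, List.all_cons, List.all_nil,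
        Bool.and_eq_true, beq_iff_eq, PySem.Str.len_eq] at hzip
      have hl1 : a1.toList.length = 8 := by exact_mod_cast hzip.1
      have hl2 : a2.toList.length = 4 := by exact_mod_cast hzip.2.1
      have hl3 : a3.toList.length = 4 := by exact_mod_cast hzip.2.2.1
      have hl4 : a4.toList.length = 4 := by exact_mod_cast hzip.2.2.2.1
      have hl5 : a5.toList.length = 12 := by exact_mod_cast hzip.2.2.2.2.1
      have hjoin := pvJoinD_splitDash s.toList
      rw [← hbridge] at hjoin
      simp only [pvJoinD, List.flatMap_cons, List.flatMap_nil, List.append_nil,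
        List.cons_append] at hjoin
      have hnod := pvSplitDash_noDash s.toList
      rw [← hbridge] at hnod
      refine ⟨a1.toList, a2.toList, a3.toList, a4.toList, a5.toList, hjoin.symm,
        hl1, hl2, hl3, hl4, hl5, ?_⟩
      rw [List.all_eq_true]
      intro c hc
      have hcs : c ∈ s.toList := by
        rw [← hjoin]
        simp only [List.mem_append, List.mem_cons] at hc ⊢
        tauto
      have hdash : pvHexDash.contains c = true := List.all_eq_true.1 h c hcs
      have hne : c ≠ '-' := by
        simp only [List.mem_append] at hc
        rcases hc with ((((h1 | h1) | h1) | h1) | h1) <;>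
          exact fun he => hnod _ (by simp) (he ▸ h1)
      exact pvHexB_of_hexDash c hdash hne
    · rintro ⟨p1, p2, p3, p4, p5, heq, hl1, hl2, hl3, hl4, hl5, hall⟩
      simp only [List.append_assoc, List.all_append, Bool.and_eq_true] at hall
      obtain ⟨hx1, hx2, hx3, hx4, hx5⟩ := hall
      have hsd : pvSplitDash s.toList = [p1, p2, p3, p4, p5] := by
        rw [heq, pvSplitDash_shape _ _ (pvNoDash_of_allHex _ hx1),
          pvSplitDash_shape _ _ (pvNoDash_of_allHex _ hx2),
          pvSplitDash_shape _ _ (pvNoDash_of_allHex _ hx3),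
          pvSplitDash_shape _ _ (pvNoDash_of_allHex _ hx4),
          pvSplitDash_noDash_id _ (pvNoDash_of_allHex _ hx5)]
      rw [hsd] at hbridge
      obtain ⟨b1, b2, b3, b4, b5, rfl⟩ :
          ∃ b1 b2 b3 b4 b5, parts = [b1, b2, b3, b4, b5] := by
        have h5 : parts.length = 5 := by
          have := congrArg List.length hbridge
          simpa using this
        rcases parts with _ | ⟨b1, _ | ⟨b2, _ | ⟨b3, _ | ⟨b4, _ | ⟨b5, rest⟩⟩⟩⟩⟩ <;>
          simp only [List.length_nil, List.length_cons] at h5 <;> try omega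
        have : rest = [] := List.eq_nil_of_length_eq_zero (by omega)
        exact ⟨b1, b2, b3, b4, b5, by rw [this]⟩
      simp only [List.map_cons, List.map_nil, List.cons.injEq, and_true] at hbridge
      obtain ⟨hb1, hb2, hb3, hb4, hb5⟩ := hbridge
      rw [if_neg (by simp)]
      rw [if_neg ?hzip]
      case hzip =>
        simp only [List.zip_cons_cons, List.zip_nil_right, List.all_cons, List.all_nil,
          Bool.and_eq_true, beq_iff_eq, PySem.Str.len_eq, not_not,
          hb1, hb2, hb3, hb4, hb5, hl1, hl2, hl3, hl4, hl5]
        simp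
      rw [List.all_eq_true]
      intro c hc
      rw [heq] at hc
      simp only [List.mem_append, List.mem_cons] at hc
      have hdashmem : pvHexDash.contains '-' = true := by decide
      rcases hc with h1 | (rfl | h1 | (rfl | h1 | (rfl | h1 | (rfl | h1)))) <;>
        first
          | exact hdashmem
          | exact pvHexDash_of_hexB c (List.all_eq_true.1 (by assumption) c h1)

-- ===== VERDICT (by name: the statement is the Claim_ definition above) =====
theorem is_valid_uuid_spec : Claim_equal_is_valid_uuid := by
  intro s _
  unfold Spec_is_valid_uuid
  have h := (pvA_iff s).trans (pvAlt_iff s).symm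
  cases ha : is_valid_uuid s <;> cases hb : is_valid_uuid_alt s <;> simp_all
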